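-- pv_equiv track=rewrite | github.com/AzonDvin/charbuilder | character.py | skill_purchase_cost
-- ===== SOURCE A (Python) =====
-- def _die_to_num(die: str) -> int:
--     return {"d4": 4, "d6": 6, "d8": 8, "d10": 10, "d12": 12}.get(die, 4)
--
-- def skill_purchase_cost(
--     skill_name: str,
--     die_value: str,
--     attributes: dict,
--     core_skills: set,
--     skill_attributes: dict,
-- ) -> int:
--     """Savage Worlds-style skill point cost from default (core d4 / non-core Untrained) to die_value."""
--     is_core = skill_name in core_skills
--     if die_value == "Untrained":
--         return 0
--     if die_value == "d4":
--         return 0 if is_core else 1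
--     if die_value not in {"d6", "d8", "d10", "d12"}:
--         return 0
--     linked = skill_attributes.get(skill_name, "Smarts")
--     attr_val = _die_to_num(attributes.get(linked, "d4"))
--     val = _die_to_num(die_value)
--     total = 0 if is_core else 1
--     for step in range(1, (val - 4) // 2 + 1):
--         current_die = 4 + (step - 1) * 2
--         total += 1 if current_die < attr_val else 2
--     return total
-- ===== SOURCE B (Python) =====
-- def _die_to_num(die: str) -> int:
--     return {"d4": 4, "d6": 6, "d8": 8, "d10": 10, "d12": 12}.get(die, 4)
--
-- _STEPS = {"d6": 1, "d8": 2, "d10": 3, "d12": 4}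
--
-- def skill_purchase_cost(
--     skill_name: str,
--     die_value: str,
--     attributes: dict,
--     core_skills: set,
--     skill_attributes: dict,
-- ) -> int:
--     if die_value == "Untrained":
--         return 0
--     if die_value == "d4":
--         return 0 if skill_name in core_skills else 1
--     n = _STEPS.get(die_value)
--     if n is None:
--         return 0
--     linked = skill_attributes.get(skill_name, "Smarts")
--     attr_val = _die_to_num(attributes.get(linked, "d4"))
--     base = 0 if skill_name in core_skills else 1
--     below = max(0, min(n, (attr_val - 4) // 2))
--     return base + 2 * n - below
-- ===== Notes on version B (the rewrite author's own statement) =====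
-- stated objective: simpler
-- what changed: The per-step accumulation loop is replaced by a closed form: cost = base + 2*n - count_of_ladder_dice_below_attribute, with the count computed arithmetically.
import Mathlib
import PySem

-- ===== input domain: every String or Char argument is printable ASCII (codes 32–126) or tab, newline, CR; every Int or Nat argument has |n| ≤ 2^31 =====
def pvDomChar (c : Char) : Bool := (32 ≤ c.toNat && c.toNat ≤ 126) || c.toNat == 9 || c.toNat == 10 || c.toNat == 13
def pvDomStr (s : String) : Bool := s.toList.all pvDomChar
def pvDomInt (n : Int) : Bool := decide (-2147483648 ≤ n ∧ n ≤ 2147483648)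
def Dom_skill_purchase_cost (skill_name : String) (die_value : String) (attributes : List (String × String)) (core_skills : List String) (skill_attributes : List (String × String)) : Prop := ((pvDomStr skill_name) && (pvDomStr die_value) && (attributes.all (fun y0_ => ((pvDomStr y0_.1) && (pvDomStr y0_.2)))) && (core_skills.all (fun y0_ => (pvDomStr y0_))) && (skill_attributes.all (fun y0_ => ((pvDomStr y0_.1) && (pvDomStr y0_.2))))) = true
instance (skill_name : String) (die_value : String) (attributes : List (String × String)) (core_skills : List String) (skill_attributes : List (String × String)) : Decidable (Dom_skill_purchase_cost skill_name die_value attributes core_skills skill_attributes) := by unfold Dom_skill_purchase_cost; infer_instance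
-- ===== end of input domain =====

-- B replaces A's per-step accumulation loop with a closed-form count of ladder dice below the linked attribute (objective: simpler).


-- ===== PORT A =====
-- dict-literal .get helper of A (first-match lookup; Python dict keys are unique)
def pv_die_to_num (die : String) : Int :=
  (([("d4", (4:Int)), ("d6", 6), ("d8", 8), ("d10", 10), ("d12", 12)].lookup die).getD 4)

def skill_purchase_cost (skill_name : String) (die_value : String) (attributes : List (String × String)) (core_skills : List String) (skill_attributes : List (String × String)) : Int :=
  let is_core := core_skills.contains skill_name
  if die_value = "Untrained" then 0
  else if die_value = "d4" then (if is_core then 0 else 1)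
  else if ¬ (die_value = "d6" ∨ die_value = "d8" ∨ die_value = "d10" ∨ die_value = "d12") then 0
  else
    let linked := (skill_attributes.lookup skill_name).getD "Smarts"
    let attr_val := pv_die_to_num ((attributes.lookup linked).getD "d4")
    let val := pv_die_to_num die_value
    let total : Int := if is_core then 0 else 1
    (PySem.List.pyRange 1 (PySem.Int.floordiv (val - 4) 2 + 1) 1).foldl
      (fun total step => total + (if 4 + (step - 1) * 2 < attr_val then 1 else 2)) total

-- ===== PORT B =====
-- B: closed form, no loop (see Source B)
def alt_die_to_num (die : String) : Int :=
  (([("d4", (4:Int)), ("d6", 6), ("d8", 8), ("d10", 10), ("d12", 12)].lookup die).getD 4)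

def alt_steps? (die : String) : Option Int :=
  [("d6", (1:Int)), ("d8", 2), ("d10", 3), ("d12", 4)].lookup die

def skill_purchase_cost_alt (skill_name : String) (die_value : String) (attributes : List (String × String)) (core_skills : List String) (skill_attributes : List (String × String)) : Int :=
  if die_value = "Untrained" then 0
  else if die_value = "d4" then (if core_skills.contains skill_name then 0 else 1)
  else
    match alt_steps? die_value with
    | none => 0
    | some n =>
      let linked := (skill_attributes.lookup skill_name).getD "Smarts"
      let attr_val := alt_die_to_num ((attributes.lookup linked).getD "d4")
      let base : Int := if core_skills.contains skill_name then 0 else 1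
      let below := max 0 (min n (PySem.Int.floordiv (attr_val - 4) 2))
      base + 2 * n - below

-- ===== PRECONDITION & SPEC =====
def Spec_skill_purchase_cost (skill_name : String) (die_value : String) (attributes : List (String × String)) (core_skills : List String) (skill_attributes : List (String × String)) (out : Int) : Prop := out = skill_purchase_cost_alt skill_name die_value attributes core_skills skill_attributes
instance (skill_name : String) (die_value : String) (attributes : List (String × String)) (core_skills : List String) (skill_attributes : List (String × String)) (out : Int) : Decidable (Spec_skill_purchase_cost skill_name die_value attributes core_skills skill_attributes out) := by unfold Spec_skill_purchase_cost; infer_instance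

-- ===== CLAIM (what is proved, stated in full; the proofs are below) =====
def Claim_equal_skill_purchase_cost : Prop := ∀ (skill_name : String) (die_value : String) (attributes : List (String × String)) (core_skills : List String) (skill_attributes : List (String × String)), Dom_skill_purchase_cost skill_name die_value attributes core_skills skill_attributes → Spec_skill_purchase_cost skill_name die_value attributes core_skills skill_attributes (skill_purchase_cost skill_name die_value attributes core_skills skill_attributes)

-- ===== LEMMAS AND PROOFS =====

theorem alt_eq_pv (s : String) : alt_die_to_num s = pv_die_to_num s := rfl

theorem pv_die_to_num_cases (s : String) :
    pv_die_to_num s = 4 ∨ pv_die_to_num s = 6 ∨ pv_die_to_num s = 8 ∨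
    pv_die_to_num s = 10 ∨ pv_die_to_num s = 12 := by
  unfold pv_die_to_num
  simp only [List.lookup]
  cases h1 : s == "d4" <;> cases h2 : s == "d6" <;> cases h3 : s == "d8" <;>
    cases h4 : s == "d10" <;> cases h5 : s == "d12" <;>
    simp only [h1, h2, h3, h4, h5, Option.getD] <;> simp

-- ===== VERDICT (by name: the statement is the Claim_ definition above) =====
theorem skill_purchase_cost_spec : Claim_equal_skill_purchase_cost := by
  intro sn dv attrs cs sa _
  unfold Spec_skill_purchase_cost skill_purchase_cost skill_purchase_cost_alt
  by_cases hU : dv = "Untrained"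
  · simp [hU]
  by_cases h4 : dv = "d4"
  · simp [h4]
  by_cases h6 : dv = "d6"
  · subst h6
    rcases pv_die_to_num_cases ((attrs.lookup ((sa.lookup sn).getD "Smarts")).getD "d4") with h|h|h|h|h <;>
      cases hc : cs.contains sn <;>
      simp only [alt_eq_pv, h] <;> decide
  by_cases h8 : dv = "d8"
  · subst h8
    rcases pv_die_to_num_cases ((attrs.lookup ((sa.lookup sn).getD "Smarts")).getD "d4") with h|h|h|h|h <;>
      cases hc : cs.contains sn <;>
      simp only [alt_eq_pv, h] <;> decide
  by_cases h10 : dv = "d10"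
  · subst h10
    rcases pv_die_to_num_cases ((attrs.lookup ((sa.lookup sn).getD "Smarts")).getD "d4") with h|h|h|h|h <;>
      cases hc : cs.contains sn <;>
      simp only [alt_eq_pv, h] <;> decide
  by_cases h12 : dv = "d12"
  · subst h12
    rcases pv_die_to_num_cases ((attrs.lookup ((sa.lookup sn).getD "Smarts")).getD "d4") with h|h|h|h|h <;>
      cases hc : cs.contains sn <;>
      simp only [alt_eq_pv, h] <;> decide
  · have hsteps : alt_steps? dv = none := by
      simp [alt_steps?, List.lookup, beq_eq_false_iff_ne.mpr h6, beq_eq_false_iff_ne.mpr h8,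
        beq_eq_false_iff_ne.mpr h10, beq_eq_false_iff_ne.mpr h12]
    simp [hU, h4, h6, h8, h10, h12, hsteps]
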